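-- pv_equiv track=rewrite | github.com/neuro-will/keller_zlatic_vnc | keller_zlatic_vnc/data_processing.py | match_standard_subject_ids
-- ===== SOURCE A (Python) =====
-- from typing import Sequence, Tuple, Union
--
-- def match_standard_subject_ids(match_id: str, id_list:Sequence) -> int:
--     """ Searches a list of subject ids and returns the index of a match.
--
--     Args:
--         match_id: The subject id to search for
--
--         id_list: A sequence of ids to search through
--
--     Returns:
--
--         match_ind: The index of the match.  If no match is found, returns None.
--
--     Raises:
--
--         ValueError: If more than one match is found.
--
--     """
--
--     match_ind = None
--     for i, cur_id in enumerate(id_list):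
--         if cur_id == match_id:
--             if match_ind is None:
--                 match_ind = i
--             else:
--                 raise(ValueError('Found duplicate matches.'))
--     return match_ind
-- ===== SOURCE B (Python) =====
-- def match_standard_subject_ids(match_id, id_list):
--     ids = list(id_list)
--     n = ids.count(match_id)
--     if n > 1:
--         raise ValueError('Found duplicate matches.')
--     if n == 0:
--         return None
--     return ids.index(match_id)
-- ===== Notes on version B (the rewrite author's own statement) =====
-- stated objective: idiomatic
-- what changed: Replaces A's single-pass sentinel loop (with an early raise) by two library calls: count the occurrences first, branch on the count (raise on >1, None on 0), and only then locate the index with list.index.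
import Mathlib
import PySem

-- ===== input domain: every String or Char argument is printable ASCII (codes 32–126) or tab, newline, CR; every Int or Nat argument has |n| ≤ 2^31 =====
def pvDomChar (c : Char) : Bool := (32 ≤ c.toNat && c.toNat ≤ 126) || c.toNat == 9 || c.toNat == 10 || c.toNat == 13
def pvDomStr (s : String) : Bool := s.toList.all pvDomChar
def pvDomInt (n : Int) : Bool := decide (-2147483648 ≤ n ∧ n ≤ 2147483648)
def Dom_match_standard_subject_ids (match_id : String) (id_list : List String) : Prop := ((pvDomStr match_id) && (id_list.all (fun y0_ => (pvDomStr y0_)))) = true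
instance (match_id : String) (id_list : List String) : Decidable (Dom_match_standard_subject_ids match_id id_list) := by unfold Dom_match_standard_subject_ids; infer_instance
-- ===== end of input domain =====

-- B replaces A's single-pass sentinel loop (with an early raise) by two staged
-- library calls: count the occurrences, branch on the count, then list.index
-- (objective: idiomatic). Both raise ValueError on duplicate matches (outside Pre_).

-- ===== PORT A =====
-- A's enumerate loop with the `match_ind` sentinel; the `raise` branch
-- (second match with match_ind already set) is unreachable under Pre_,
-- modelled here as `none`.
def pvGoA (match_id : String) : List String → Int → Option Int → Option Int
  | [], _, match_ind => match_ind
  | cur_id :: rest, i, match_ind =>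
    if cur_id == match_id then
      match match_ind with
      | none => pvGoA match_id rest (i + 1) (some i)
      | some _ => none   -- raise ValueError('Found duplicate matches.')
    else pvGoA match_id rest (i + 1) match_ind

def match_standard_subject_ids (match_id : String) (id_list : List String) : Option Int :=
  pvGoA match_id id_list 0 none

-- ===== PORT B =====
def match_standard_subject_ids_alt (match_id : String) (id_list : List String) : Option Int :=
  let n := PySem.List.count id_list match_id
  if 1 < n then none   -- raise ValueError('Found duplicate matches.')
  else if n = 0 then none
  else (PySem.List.index? id_list match_id).map (fun k => (k : Int))

-- ===== PRECONDITION & SPEC =====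
-- Excludes exactly the inputs with two or more occurrences of match_id,
-- on which Python A raises ValueError (and Python B raises the same).
def Pre_match_standard_subject_ids (match_id : String) (id_list : List String) : Prop :=
  id_list.count match_id ≤ 1
instance (match_id : String) (id_list : List String) : Decidable (Pre_match_standard_subject_ids match_id id_list) := by unfold Pre_match_standard_subject_ids; infer_instance

def pvWitness_match_standard_subject_ids : String × List String := ("s1", ["s0", "s1", "s2"])

def Spec_match_standard_subject_ids (match_id : String) (id_list : List String) (out : Option Int) : Prop := out = match_standard_subject_ids_alt match_id id_list
instance (match_id : String) (id_list : List String) (out : Option Int) : Decidable (Spec_match_standard_subject_ids match_id id_list out) := by unfold Spec_match_standard_subject_ids; infer_instance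

-- ===== CLAIM (what is proved, stated in full; the proofs are below) =====
def Claim_equal_match_standard_subject_ids : Prop := ∀ (match_id : String) (id_list : List String), Dom_match_standard_subject_ids match_id id_list → Pre_match_standard_subject_ids match_id id_list → Spec_match_standard_subject_ids match_id id_list (match_standard_subject_ids match_id id_list)

-- ===== LEMMAS AND PROOFS =====

theorem pvGoA_of_count_zero (match_id : String) (l : List String) (i : Int) (acc : Option Int)
    (h : l.count match_id = 0) : pvGoA match_id l i acc = acc := by
  induction l generalizing i with
  | nil => rfl
  | cons c rest ih =>
    simp only [List.count_cons] at h
    by_cases hc : (c == match_id) = true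
    · simp [hc] at h
    · simp only [pvGoA, hc]
      exact ih (i + 1) (by omega)

theorem pvGoA_eq_index (match_id : String) (l : List String) (i : Int)
    (h : l.count match_id ≤ 1) :
    pvGoA match_id l i none = (PySem.List.index? l match_id).map (fun k => (k : Int) + i) := by
  induction l generalizing i with
  | nil => rfl
  | cons c rest ih =>
    simp only [List.count_cons] at h
    by_cases hc : (c == match_id) = true
    · have hceq : c = match_id := by exact beq_iff_eq.mp hc
      have hz : rest.count match_id = 0 := by
        simp [hc] at h; omega
      simp only [pvGoA, hc, if_pos]
      rw [pvGoA_of_count_zero match_id rest (i + 1) (some i) hz]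
      rw [hceq, PySem.List.index?_cons_self]
      simp
    · have hcne : c ≠ match_id := by simpa [beq_iff_eq] using hc
      rw [PySem.List.index?_cons_of_ne rest hcne]
      simp only [pvGoA, if_neg hc]
      rw [ih (i + 1) (by simpa [hc] using h)]
      cases PySem.List.index? rest match_id with
      | none => rfl
      | some k =>
        simp only [Option.bind_eq_bind, Option.bind_some, Option.pure_def, Option.map_some, Option.some.injEq]
        push_cast
        ring

-- ===== VERDICT (by name: the statement is the Claim_ definition above) =====
theorem match_standard_subject_ids_spec : Claim_equal_match_standard_subject_ids := by
  intro match_id id_list _ hpre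
  unfold Spec_match_standard_subject_ids match_standard_subject_ids match_standard_subject_ids_alt
  have hcnt : PySem.List.count id_list match_id = id_list.count match_id :=
    PySem.List.count_eq _ _
  by_cases h0 : id_list.count match_id = 0
  · have hnone : PySem.List.index? id_list match_id = none := by
      rw [PySem.List.index?_eq_none_iff]
      simpa [List.count_eq_zero] using h0
    simp [pvGoA_of_count_zero match_id id_list 0 none h0, h0]
  · have h1 : id_list.count match_id = 1 := by
      unfold Pre_match_standard_subject_ids at hpre; omega
    rw [pvGoA_eq_index match_id id_list 0 hpre]
    simp [h1]
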